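-- pv_equiv track=rewrite | github.com/6puritans9/codetree-TILs | 241221/알파벳과 사칙연산/calculations-with-alphabet.py | find_maximum_result
-- ===== SOURCE A (Python) =====
-- def calculate(a, b, operator):
--     if operator == "+":
--         return a + b
--     elif operator == "-":
--         return a - b
--     elif operator == "*":
--         return a * b
--
-- def evaluate_expression(values, letters, operators):
--     # Replace letters with their assigned values
--     stack = [values[0]]  # Start with the first value
--
--     for i in range(len(operators)):
--         operator = operators[i]
--         value = values[i + 1]
--         result = calculate(stack.pop(), value, operator)
--         stack.append(result)
--
--     return stack[0]
--
-- def generate_combinations(idx, current_values, unique_letters, max_result, letters, operators):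
--     if idx == len(unique_letters):
--         # Evaluate the expression with the current value combination
--         letter_value_map = {unique_letters[i]: current_values[i] for i in range(len(unique_letters))}
--         values = [letter_value_map[char] for char in letters]
--         result = evaluate_expression(values, letters, operators)
--         return max(max_result, result)
--
--     for value in range(1, 5):  # Assign values 1 to 4
--         current_values[idx] = value
--         max_result = generate_combinations(idx + 1, current_values, unique_letters, max_result, letters, operators)
--
--     return max_result
--
-- def find_maximum_result(expression):
--     # Parse the expression
--     letters = []
--     operators = []
--     for char in expression:
--         if char in "+-*":
--             operators.append(char)
--         else:
--             letters.append(char)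
--
--     # Get unique letters
--     unique_letters = list(set(letters))
--     max_result = float('-inf')
--
--     # Use recursive generation of combinations
--     max_result = generate_combinations(0, [0] * len(unique_letters), unique_letters, max_result, letters, operators)
--
--     return max_result
-- ===== SOURCE B (Python) =====
-- def find_maximum_result(expression):
--     lets = [c for c in expression if c not in "+-*"]
--     ops = [c for c in expression if c in "+-*"]
--     uniq = list(dict.fromkeys(lets))
--     k = len(uniq)
--     seq = [uniq.index(c) for c in lets]
--     best = None
--     for m in range(4 ** k):
--         digits = [(m // 4 ** (k - 1 - i)) % 4 + 1 for i in range(k)]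
--         acc = digits[seq[0]]
--         for i in range(len(ops)):
--             v = digits[seq[i + 1]]
--             op = ops[i]
--             if op == "+":
--                 acc = acc + v
--             elif op == "-":
--                 acc = acc - v
--             else:
--                 acc = acc * v
--         if best is None or acc > best:
--             best = acc
--     return best
-- ===== Notes on version B (the rewrite author's own statement) =====
-- stated objective: faster
-- what changed: Replaces the recursive generate_combinations over a mutated value array, the per-combination letter->value dict and the stack-based evaluator by a single flat loop over a base-4 counter m in range(4**k) whose digits are decoded arithmetically, a precomputed index sequence seq (so no dict and no value list is built per combination) and a plain running accumulator with a running max.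
import Mathlib
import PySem

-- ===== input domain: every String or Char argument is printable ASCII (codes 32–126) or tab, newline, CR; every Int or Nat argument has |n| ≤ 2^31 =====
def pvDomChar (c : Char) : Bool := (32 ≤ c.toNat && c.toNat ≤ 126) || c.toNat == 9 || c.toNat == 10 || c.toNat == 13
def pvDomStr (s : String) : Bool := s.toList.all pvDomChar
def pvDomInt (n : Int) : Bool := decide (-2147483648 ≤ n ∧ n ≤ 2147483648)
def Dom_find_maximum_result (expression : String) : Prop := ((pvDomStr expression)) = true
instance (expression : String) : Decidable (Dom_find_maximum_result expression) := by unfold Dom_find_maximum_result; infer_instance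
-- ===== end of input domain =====

-- B replaces A's recursive combination generator, per-combination dict and stack evaluator by one flat
-- loop over a base-4 counter with arithmetically decoded digits, a precomputed index sequence and a
-- running accumulator/max (objective: faster by a constant factor — no per-combination allocation —
-- measured; same exponential asymptotics).

-- ===== PORT A =====
-- calculate(a, b, operator); Python returns None on any other operator — unreachable here, since
-- operators only ever holds '+', '-', '*'; that branch is ported as 0.
def calculate (a b : Int) (operator : Char) : Int :=
  if operator = '+' then a + b
  else if operator = '-' then a - b
  else if operator = '*' then a * b
  else 0

-- evaluate_expression(values, letters, operators); letters is an unused parameter in the Python too.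
-- stack.pop() = read stack[-1] (IndexError impossible: stack always nonempty) and drop it.
def evaluate_expression (values : List Int) (letters operators : List Char) : Int :=
  let stack : List Int := [PySem.List.pyGetD values 0 0]
  let stack := (PySem.List.pyRange 0 (operators.length : Int) 1).foldl
    (fun stack i =>
      let operator := PySem.List.pyGetD operators i ' '
      let value := PySem.List.pyGetD values (i + 1) 0
      let result := calculate (PySem.List.pyGetD stack (-1) 0) value operator
      stack.dropLast ++ [result]) stack
  PySem.List.pyGetD stack 0 0

-- generate_combinations(idx, current_values, unique_letters, max_result, letters, operators);
-- max_result : Option Int, none = float('-inf') (max(-inf, r) = r).  idx is a Nat here; the Python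
-- test 'idx == len(unique_letters)' is ported as 'len ≤ idx' — identical on all reachable calls
-- (idx never exceeds the length), and it makes termination evident.
def generate_combinations (idx : Nat) (current_values : List Int) (unique_letters : List Char)
    (max_result : Option Int) (letters operators : List Char) : Option Int :=
  if h : unique_letters.length ≤ idx then
    let letter_value_map : PySem.Dict Char Int :=
      (PySem.List.pyRange 0 (unique_letters.length : Int) 1).foldl
        (fun d i => d.insert (PySem.List.pyGetD unique_letters i ' ') (PySem.List.pyGetD current_values i 0))
        PySem.Dict.empty
    let values := letters.map (fun char => letter_value_map.getD char 0)
    let result := evaluate_expression values letters operators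
    some (match max_result with
          | none => result
          | some mr => max mr result)
  else
    (PySem.List.pyRange 1 5 1).foldl
      (fun mr value =>
        generate_combinations (idx + 1) (PySem.List.pySetD current_values (idx : Int) value)
          unique_letters mr letters operators)
      max_result
termination_by unique_letters.length - idx
decreasing_by omega

-- list(set(letters)) : Python's set iteration order is unspecified; the maximum below is independent
-- of that order, so it is ported in first-occurrence order (PySem.Set.ofList).
def find_maximum_result (expression : String) : Int :=
  let p := expression.toList.foldl
    (fun (p : List Char × List Char) char =>
      if ['+', '-', '*'].contains char then (p.1, p.2 ++ [char]) else (p.1 ++ [char], p.2))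
    ([], [])
  let letters := p.1
  let operators := p.2
  let unique_letters := PySem.Set.ofList letters
  let max_result := generate_combinations 0 (List.replicate unique_letters.length 0)
      unique_letters none letters operators
  -- the base case is always reached at least once, so max_result is some; getD 0 is never the default
  max_result.getD 0

-- ===== PORT B =====
-- Source B: flat loop over m in range(4**k); digits decoded as (m // 4**(k-1-i)) % 4 + 1 (the exponent is
-- ≥ 0 throughout the loop, so .toNat is exact); best : Option Int, none = Python's initial None.
def find_maximum_result_alt (expression : String) : Int :=
  let lets := expression.toList.filter (fun c => !(['+', '-', '*'].contains c))
  let ops := expression.toList.filter (fun c => ['+', '-', '*'].contains c)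
  let uniq := PySem.List.dedup lets
  let k := uniq.length
  let seq : List Int := lets.map (fun c => (((PySem.List.index? uniq c).getD 0 : Nat) : Int))
  let best : Option Int := none
  let best := (PySem.List.pyRange 0 ((4 : Int) ^ k) 1).foldl
    (fun best m =>
      let digits : List Int := (PySem.List.pyRange 0 (k : Int) 1).map
        (fun i => PySem.Int.mod (PySem.Int.floordiv m ((4 : Int) ^ ((k : Int) - 1 - i).toNat)) 4 + 1)
      let acc0 := PySem.List.pyGetD digits (PySem.List.pyGetD seq 0 0) 0
      let acc := (PySem.List.pyRange 0 (ops.length : Int) 1).foldl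
        (fun acc i =>
          let v := PySem.List.pyGetD digits (PySem.List.pyGetD seq (i + 1) 0) 0
          let op := PySem.List.pyGetD ops i ' '
          if op = '+' then acc + v
          else if op = '-' then acc - v
          else acc * v) acc0
      match best with
      | none => some acc
      | some b => if acc > b then some acc else some b) best
  -- the loop runs 4^k ≥ 1 times, so best is some; getD 0 is never the default
  best.getD 0

-- ===== PRECONDITION & SPEC =====
-- Pre_ excludes exactly the inputs on which the Python A raises IndexError: expressions with fewer
-- non-operator characters than operators+1 (including the empty expression).
def Pre_find_maximum_result (expression : String) : Prop :=
  (expression.toList.filter (fun c => ['+', '-', '*'].contains c)).length + 1 ≤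
  (expression.toList.filter (fun c => !(['+', '-', '*'].contains c))).length

instance (expression : String) : Decidable (Pre_find_maximum_result expression) := by
  unfold Pre_find_maximum_result; infer_instance

def pvWitness_find_maximum_result : String := "a+b"

def Spec_find_maximum_result (expression : String) (out : Int) : Prop :=
  out = find_maximum_result_alt expression
instance (expression : String) (out : Int) : Decidable (Spec_find_maximum_result expression out) := by
  unfold Spec_find_maximum_result; infer_instance

-- ===== CLAIM (what is proved, stated in full; the proofs are below) =====
def Claim_equal_find_maximum_result : Prop := ∀ (expression : String),
  Dom_find_maximum_result expression → Pre_find_maximum_result expression →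
  Spec_find_maximum_result expression (find_maximum_result expression)

-- ===== LEMMAS AND PROOFS =====

-- A's per-combination dict from unique letters to assigned values
def pvDict (U : List Char) (t : List Int) : PySem.Dict Char Int :=
  (PySem.List.pyRange 0 (U.length : Int) 1).foldl
    (fun d i => d.insert (PySem.List.pyGetD U i ' ') (PySem.List.pyGetD t i 0)) PySem.Dict.empty

-- value assigned to letter c by tuple t (B's lookup path)
def pvVal (U : List Char) (t : List Int) (c : Char) : Int :=
  PySem.List.pyGetD t (((PySem.List.index? U c).getD 0 : Nat) : Int) 0

-- A's result for one fully assigned tuple t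
def pvRes (L O : List Char) (t : List Int) : Int :=
  evaluate_expression (L.map (fun c => (pvDict (PySem.List.dedup L) t).getD c 0)) L O

-- B's result for one fully assigned tuple t (Source B's inner loop with digits := t)
def pvBInner (L O : List Char) (t : List Int) : Int :=
  let uniq := PySem.List.dedup L
  let seq : List Int := L.map (fun c => (((PySem.List.index? uniq c).getD 0 : Nat) : Int))
  let acc0 := PySem.List.pyGetD t (PySem.List.pyGetD seq 0 0) 0
  (PySem.List.pyRange 0 (O.length : Int) 1).foldl
    (fun acc i =>
      let v := PySem.List.pyGetD t (PySem.List.pyGetD seq (i + 1) 0) 0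
      let op := PySem.List.pyGetD O i ' '
      if op = '+' then acc + v
      else if op = '-' then acc - v
      else acc * v) acc0

def pvFmax (a : Option Int) (r : Int) : Option Int :=
  some (match a with | none => r | some mr => max mr r)

-- the tuple written by A's recursion: n digits of r (MSB first) into cur at positions idx, idx+1, …
def pvWrite : Nat → List Int → Nat → Nat → List Int
  | 0, cur, _, _ => cur
  | n + 1, cur, idx, r => pvWrite n (cur.set idx ((r / 4 ^ n + 1 : Nat) : Int)) (idx + 1) (r % 4 ^ n)

-- partitioning loop of A = the two filters of B
theorem pvPartition (p : Char → Bool) (cs : List Char) : ∀ acc1 acc2 : List Char,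
    cs.foldl (fun (pr : List Char × List Char) c =>
        if p c then (pr.1, pr.2 ++ [c]) else (pr.1 ++ [c], pr.2)) (acc1, acc2)
      = (acc1 ++ cs.filter (fun c => !(p c)), acc2 ++ cs.filter p) := by
  induction cs with
  | nil => intro a1 a2; simp
  | cons c cs ih =>
    intro a1 a2
    by_cases h : p c <;> simp [h, ih]

-- A's singleton stack is a scalar accumulator
theorem pvStackFold (step : Int → Int → Int) (idxs : List Int) : ∀ x : Int,
    idxs.foldl (fun (st : List Int) i => st.dropLast ++ [step (PySem.List.pyGetD st (-1) 0) i]) [x]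
      = [idxs.foldl step x] := by
  induction idxs with
  | nil => intro x; rfl
  | cons i is ih =>
    intro x
    have h1 : PySem.List.pyGetD [x] (-1) 0 = x := by
      rw [PySem.List.pyGetD_neg_one _ _ (by simp)]; rfl
    simpa [h1] using ih (step x i)

-- evaluate_expression as a plain left fold
theorem pvEvalExpr (values : List Int) (L O : List Char) :
    evaluate_expression values L O
      = (PySem.List.pyRange 0 (O.length : Int) 1).foldl
          (fun a i => calculate a (PySem.List.pyGetD values (i + 1) 0) (PySem.List.pyGetD O i ' '))
          (PySem.List.pyGetD values 0 0) := by
  unfold evaluate_expression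
  dsimp only
  rw [pvStackFold (fun a i => calculate a (PySem.List.pyGetD values (i + 1) 0) (PySem.List.pyGetD O i ' '))]
  exact PySem.List.pyGetD_zero_cons _ _ _

-- first occurrence index of a member
theorem pvIndexSpec (U : List Char) (c : Char) (hc : c ∈ U) :
    ∃ j : Nat, PySem.List.index? U c = some j ∧ j < U.length ∧ U[j]? = some c := by
  cases h : PySem.List.index? U c with
  | none => exact absurd ((PySem.List.index?_eq_none_iff U c).mp h) (by simpa using hc)
  | some j =>
    obtain ⟨pre, suf, hU, hlen, -⟩ := (PySem.List.index?_eq_some_iff U c j).mp h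
    refine ⟨j, rfl, ?_, ?_⟩
    · subst hU; simp [← hlen]
    · subst hU
      rw [List.getElem?_append_right (by omega)]
      simp [← hlen]

-- A's per-combination dict looks up exactly B's indexed value
theorem pvDict_getD (U : List Char) (t : List Int) (c : Char) (hnd : U.Nodup) (hc : c ∈ U) :
    (pvDict U t).getD c 0 = pvVal U t c := by
  obtain ⟨j, hj, hjlt, hjget⟩ := pvIndexSpec U c hc
  have hmap : (PySem.List.pyRange 0 (U.length : Int) 1).map (fun i => PySem.List.pyGetD U i ' ') = U :=
    PySem.List.map_pyGetD_pyRange_zero' U ' '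
  have hnd' : ((PySem.List.pyRange 0 (U.length : Int) 1).map (fun i => PySem.List.pyGetD U i ' ')).Nodup := by
    rw [hmap]; exact hnd
  have hitems : (pvDict U t).items
      = (PySem.List.pyRange 0 (U.length : Int) 1).map
          (fun i => (PySem.List.pyGetD U i ' ', PySem.List.pyGetD t i 0)) := by
    unfold pvDict
    rw [PySem.Dict.items_foldl_insert_fresh _ _ _ _ (fun a _ => PySem.Dict.contains_empty _) hnd']
    rfl
  have hkeys : (pvDict U t).keys.Nodup := by
    have hk : (pvDict U t).keys = U := by
      show ((pvDict U t).items.map (·.1)) = U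
      rw [hitems, List.map_map]
      exact hmap
    rw [hk]; exact hnd
  have hgetU : PySem.List.pyGetD U (j : Int) ' ' = c := by
    rw [PySem.List.pyGetD_natCast, List.getD_eq_getElem?_getD, hjget]
    rfl
  have hmem : (c, PySem.List.pyGetD t (j : Int) 0) ∈ (pvDict U t).items := by
    rw [hitems]
    refine List.mem_map.mpr ⟨(j : Int), ?_, by rw [hgetU]⟩
    exact PySem.List.mem_pyRange_one.mpr ⟨by exact_mod_cast Nat.zero_le j, by exact_mod_cast hjlt⟩
  rw [PySem.Dict.getD_of_mem_items (pvDict U t) hmem hkeys 0]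
  unfold pvVal
  rw [hj]
  rfl

-- per-tuple: A's dict-and-stack evaluation equals B's indexed accumulator loop
theorem pvResEq (L O : List Char) (t : List Int)
    (hlen : O.length + 1 ≤ L.length)
    (hop : ∀ c ∈ O, c = '+' ∨ c = '-' ∨ c = '*') :
    pvRes L O t = pvBInner L O t := by
  unfold pvRes pvBInner
  rw [pvEvalExpr]
  dsimp only
  have hnd : (PySem.List.dedup L).Nodup := PySem.List.nodup_dedup L
  have hval : ∀ j : Nat, j < L.length →
      PySem.List.pyGetD (L.map (fun c => (pvDict (PySem.List.dedup L) t).getD c 0)) (j : Int) 0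
        = PySem.List.pyGetD t
            (PySem.List.pyGetD (L.map (fun c => (((PySem.List.index? (PySem.List.dedup L) c).getD 0 : Nat) : Int))) (j : Int) 0) 0 := by
    intro j hj
    rw [PySem.List.pyGetD_natCast, PySem.List.pyGetD_natCast,
        List.getD_eq_getElem?_getD, List.getD_eq_getElem?_getD,
        List.getElem?_map, List.getElem?_map, List.getElem?_eq_getElem hj]
    simp only [Option.map_some, Option.getD_some]
    rw [pvDict_getD _ _ _ hnd ((PySem.List.mem_dedup _ _).mpr (List.getElem_mem hj))]
    rfl
  have hini := hval 0 (by omega)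
  simp only [Nat.cast_zero] at hini
  rw [hini]
  apply PySem.List.foldl_congr_mem
  intro a i hi
  obtain ⟨hi0, hi1⟩ := PySem.List.mem_pyRange_one.mp hi
  obtain ⟨j, rfl⟩ : ∃ j : Nat, i = (j : Int) := ⟨i.toNat, (Int.toNat_of_nonneg hi0).symm⟩
  have hj : j < O.length := by exact_mod_cast hi1
  have hstep := hval (j + 1) (by omega)
  push_cast at hstep
  rw [hstep]
  have hoj : PySem.List.pyGetD O ((j : Nat) : Int) ' ' ∈ O := by
    rw [PySem.List.pyGetD_natCast, List.getD_eq_getElem?_getD, List.getElem?_eq_getElem hj]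
    exact List.getElem_mem hj
  rcases hop _ hoj with hc | hc | hc <;> rw [hc] <;> simp [calculate]

-- one digit block of the counter
theorem pvWriteBlock (n idx : Nat) (cur : List Int) (v r : Nat) (hr : r < 4 ^ n) :
    pvWrite (n + 1) cur idx (v * 4 ^ n + r)
      = pvWrite n (cur.set idx ((v + 1 : Nat) : Int)) (idx + 1) r := by
  have hpos : 0 < (4:Nat) ^ n := by positivity
  show pvWrite n (cur.set idx (((v * 4 ^ n + r) / 4 ^ n + 1 : Nat) : Int)) (idx + 1)
      ((v * 4 ^ n + r) % 4 ^ n) = _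
  have hdiv : (v * 4 ^ n + r) / 4 ^ n = v := by
    rw [mul_comm, Nat.mul_add_div hpos, Nat.div_eq_of_lt hr, Nat.add_zero]
  have hmod : (v * 4 ^ n + r) % 4 ^ n = r := by
    rw [mul_comm, Nat.mul_add_mod, Nat.mod_eq_of_lt hr]
  rw [hdiv, hmod]

-- a fold over range (4*A) is four chained folds over range A
theorem pvFoldRange4 {β : Type} (A : Nat) (g : β → Nat → β) (acc : β) :
    (List.range (A + (A + (A + A)))).foldl g acc
      = (List.range A).foldl (fun a r => g a (3 * A + r))
          ((List.range A).foldl (fun a r => g a (2 * A + r))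
            ((List.range A).foldl (fun a r => g a (1 * A + r))
              ((List.range A).foldl g acc))) := by
  rw [List.range_add, List.foldl_append, List.foldl_map,
      List.range_add, List.foldl_append, List.foldl_map,
      List.range_add, List.foldl_append, List.foldl_map]
  have e2 : (fun (a : β) (x : Nat) => g a (A + x)) = fun a r => g a (1 * A + r) := by
    funext a x; congr 1; ring
  have e3 : (fun (a : β) (x : Nat) => g a (A + (A + x))) = fun a r => g a (2 * A + r) := by
    funext a x; congr 1; ring
  have e4 : (fun (a : β) (x : Nat) => g a (A + (A + (A + x)))) = fun a r => g a (3 * A + r) := by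
    funext a x; congr 1; ring
  rw [e2, e3, e4]

-- A's recursion enumerates assignments as a base-4 counter (MSB first)
theorem pvGenEq (L O : List Char) :
    ∀ (n idx : Nat) (cur : List Int) (acc : Option Int),
      idx + n = (PySem.List.dedup L).length →
      generate_combinations idx cur (PySem.List.dedup L) acc L O
        = (List.range (4 ^ n)).foldl
            (fun a r => pvFmax a (pvRes L O (pvWrite n cur idx r))) acc := by
  intro n
  induction n with
  | zero =>
    intro idx cur acc h
    rw [generate_combinations, dif_pos (by omega)]
    rw [show (4:Nat) ^ 0 = 1 from rfl, List.range_one]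
    simp only [List.foldl_cons, List.foldl_nil]
    rfl
  | succ n ih =>
    intro idx cur acc h
    rw [generate_combinations, dif_neg (by omega)]
    have hlist : PySem.List.pyRange 1 5 1 = [1, 2, 3, 4] := by decide
    rw [hlist]
    simp only [List.foldl_cons, List.foldl_nil]
    have hset : ∀ v : Int, PySem.List.pySetD cur (idx : Int) v = cur.set idx v :=
      fun v => PySem.List.pySetD_natCast cur idx v
    rw [hset, hset, hset, hset]
    rw [ih (idx + 1) (cur.set idx 1) acc (by omega)]
    rw [ih (idx + 1) (cur.set idx 2) _ (by omega)]
    rw [ih (idx + 1) (cur.set idx 3) _ (by omega)]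
    rw [ih (idx + 1) (cur.set idx 4) _ (by omega)]
    have hsplit : (4:Nat) ^ (n + 1) = 4 ^ n + (4 ^ n + (4 ^ n + 4 ^ n)) := by ring
    rw [hsplit, pvFoldRange4]
    have hblock : ∀ (v : Nat) (w : Int), ((v + 1 : Nat) : Int) = w →
        ∀ (a0 : Option Int),
        (List.range (4 ^ n)).foldl (fun a r => pvFmax a (pvRes L O (pvWrite (n + 1) cur idx (v * 4 ^ n + r)))) a0
          = (List.range (4 ^ n)).foldl (fun a r => pvFmax a (pvRes L O (pvWrite n (cur.set idx w) (idx + 1) r))) a0 := by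
      intro v w hw a0
      apply PySem.List.foldl_congr_mem
      intro a r hrm
      rw [pvWriteBlock n idx cur v r (List.mem_range.mp hrm), hw]
    have hblock0 : ∀ (a0 : Option Int),
        (List.range (4 ^ n)).foldl (fun a r => pvFmax a (pvRes L O (pvWrite (n + 1) cur idx r))) a0
          = (List.range (4 ^ n)).foldl (fun a r => pvFmax a (pvRes L O (pvWrite n (cur.set idx 1) (idx + 1) r))) a0 := by
      intro a0
      have := hblock 0 1 (by norm_num) a0
      simpa using this
    rw [hblock0, hblock 1 2 (by norm_num), hblock 2 3 (by norm_num), hblock 3 4 (by norm_num)]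

-- the digit written at each position
theorem pvDigitSplit (r e n : Nat) (he : e < n) : r / 4 ^ e % 4 = r % 4 ^ n / 4 ^ e % 4 := by
  conv_lhs => rw [← Nat.div_add_mod r (4 ^ n)]
  have h4 : (4:Nat) ^ n = 4 ^ e * 4 ^ (n - e - 1) * 4 := by
    have hn : e + (n - e - 1) + 1 = n := by omega
    calc (4:Nat) ^ n = 4 ^ (e + (n - e - 1) + 1) := by rw [hn]
      _ = 4 ^ e * 4 ^ (n - e - 1) * 4 := by rw [pow_add, pow_add, pow_one]
  have hpos : 0 < (4:Nat) ^ e := by positivity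
  rw [h4]
  have hre : 4 ^ e * 4 ^ (n - e - 1) * 4 * (r / (4 ^ e * 4 ^ (n - e - 1) * 4)) + r % (4 ^ e * 4 ^ (n - e - 1) * 4)
      = r % (4 ^ e * 4 ^ (n - e - 1) * 4) + 4 ^ (n - e - 1) * (r / (4 ^ e * 4 ^ (n - e - 1) * 4)) * 4 * 4 ^ e := by
    ring
  rw [hre, Nat.add_mul_div_right _ _ hpos, Nat.add_mul_mod_self_right]

theorem pvWriteEq : ∀ (n idx : Nat) (cur : List Int) (r : Nat),
    cur.length = idx + n → r < 4 ^ n →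
    pvWrite n cur idx r
      = cur.take idx ++ (List.range n).map (fun j => ((r / 4 ^ (n - 1 - j) % 4 + 1 : Nat) : Int)) := by
  intro n
  induction n with
  | zero =>
    intro idx cur r hlen hr
    have ht : cur.take idx = cur := List.take_of_length_le (by omega)
    simp [pvWrite, ht]
  | succ n ih =>
    intro idx cur r hlen hr
    have hpos : 0 < (4:Nat) ^ n := by positivity
    have hlt : idx < cur.length := by omega
    have hdlt : r / 4 ^ n < 4 := by
      rw [Nat.div_lt_iff_lt_mul hpos]
      calc r < 4 ^ (n + 1) := hr
        _ = 4 * 4 ^ n := by ring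
    show pvWrite n (cur.set idx ((r / 4 ^ n + 1 : Nat) : Int)) (idx + 1) (r % 4 ^ n) = _
    rw [ih (idx + 1) (cur.set idx ((r / 4 ^ n + 1 : Nat) : Int)) (r % 4 ^ n)
        (by simp; omega) (Nat.mod_lt _ hpos)]
    have hset : (cur.set idx ((r / 4 ^ n + 1 : Nat) : Int)).take (idx + 1)
        = cur.take idx ++ [((r / 4 ^ n + 1 : Nat) : Int)] := by
      rw [List.take_set, List.take_add_one, List.getElem?_eq_getElem hlt]
      have hl : (cur.take idx).length = idx := by rw [List.length_take]; omega
      rw [List.set_append, if_neg (by rw [hl]; omega), hl]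
      simp
    rw [hset, List.append_assoc]
    congr 1
    rw [List.range_succ_eq_map, List.map_cons, List.map_map, List.singleton_append]
    congr 1
    · have : n + 1 - 1 - 0 = n := by omega
      rw [this, Nat.mod_eq_of_lt hdlt]
    · apply List.map_congr_left
      intro j hj
      have hjn : j < n := List.mem_range.mp hj
      simp only [Function.comp]
      have h1 : n + 1 - 1 - (j + 1) = n - 1 - j := by omega
      have h2 : n - 1 - j < n := by omega
      rw [Nat.succ_eq_add_one, h1, pvDigitSplit r (n - 1 - j) n h2]

-- B's arithmetic digit list is exactly that tuple
theorem pvDigitsFor (k r : Nat) :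
    (PySem.List.pyRange 0 (k : Int) 1).map
        (fun i => PySem.Int.mod (PySem.Int.floordiv (r : Int) ((4 : Int) ^ (((k : Int) - 1 - i).toNat))) 4 + 1)
      = (List.range k).map (fun j => ((r / 4 ^ (k - 1 - j) % 4 + 1 : Nat) : Int)) := by
  rw [PySem.List.pyRange_zero_nat k, List.map_map]
  apply List.map_congr_left
  intro j hj
  have hjk : j < k := List.mem_range.mp hj
  simp only [Function.comp]
  have h1 : (((k : Int) - 1 - (j : Int)).toNat) = k - 1 - j := by omega
  rw [h1]
  have h2 : ((4 : Int) ^ (k - 1 - j)) = ((4 ^ (k - 1 - j) : Nat) : Int) := by push_cast; ring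
  rw [h2, PySem.Int.floordiv_natCast]
  have h3 : ((4 : Int)) = ((4 : Nat) : Int) := by norm_num
  rw [h3, PySem.Int.mod_natCast]
  push_cast
  ring

theorem pvFmaxEq (a : Option Int) (x : Int) :
    pvFmax a x = (match a with
      | none => some x
      | some b => if x > b then some x else some b) := by
  cases a with
  | none => rfl
  | some b =>
    unfold pvFmax
    by_cases h : x > b
    · simp [h, max_eq_right h.le]
    · simp [h, max_eq_left (not_lt.mp h)]

theorem find_maximum_result_spec : Claim_equal_find_maximum_result := by
  intro expr _hdom hpre
  unfold Spec_find_maximum_result find_maximum_result find_maximum_result_alt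
  dsimp only
  rw [pvPartition]
  dsimp only
  simp only [List.nil_append]
  rw [← PySem.List.dedup_eq_ofList]
  set cs := expr.toList with hcs
  set L := cs.filter (fun c => !(['+', '-', '*'].contains c)) with hLdef
  set O := cs.filter (fun c => ['+', '-', '*'].contains c) with hOdef
  have hlen : O.length + 1 ≤ L.length := hpre
  have hop : ∀ c ∈ O, c = '+' ∨ c = '-' ∨ c = '*' := by
    intro c hcm
    have := (List.mem_filter.mp hcm).2
    simpa using this
  rw [pvGenEq L O (PySem.List.dedup L).length 0 (List.replicate (PySem.List.dedup L).length 0) none (by omega)]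
  have hcast : ((4 : Int) ^ (PySem.List.dedup L).length) = ((4 ^ (PySem.List.dedup L).length : Nat) : Int) := by
    push_cast; ring
  rw [hcast, PySem.List.pyRange_zero_nat (4 ^ (PySem.List.dedup L).length), List.foldl_map]
  congr 1
  apply PySem.List.foldl_congr_mem
  intro a r hr
  have hrk : r < 4 ^ (PySem.List.dedup L).length := List.mem_range.mp hr
  rw [pvFmaxEq]
  rw [pvWriteEq (PySem.List.dedup L).length 0 (List.replicate (PySem.List.dedup L).length 0) r (by simp) hrk]
  simp only [List.take_zero, List.nil_append]
  rw [← pvDigitsFor (PySem.List.dedup L).length r]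
  rw [pvResEq L O _ hlen hop]
  rfl
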